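-- pv_equiv track=rewrite | github.com/josh22022/CPE | 12908.The book thief.py | findMissPage
-- ===== SOURCE A (Python) =====
-- def findMissPage(total):
--     page = []
--     i=1
--     find=0
--     if total != 0:
--         while True:
--             page.append(i)
--             i += 1
--             for j in range(1,len(page)+1):
--                 if sum(page) - j == total:
--                     find += j
--             if find > 0:
--                 return find, len(page)
--     elif total == 0:
--         return 0,0
-- ===== SOURCE B (Python) =====
-- def findMissPage(total):
--     # Closed-ended binary search for the smallest n with n(n+1)/2 > total,
--     # then the missing page is n(n+1)/2 - total.
--     if total == 0:
--         return 0, 0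
--     lo, hi = 1, total + 1
--     while lo < hi:
--         mid = (lo + hi) // 2
--         if mid * (mid + 1) // 2 > total:
--             hi = mid
--         else:
--             lo = mid + 1
--     return lo * (lo + 1) // 2 - total, lo
-- ===== Notes on version B (the rewrite author's own statement) =====
-- stated objective: faster
-- what changed: Replaces the grow-a-list loop with a quadratic-scan inside (A re-sums the whole page list and scans all j each round) by an O(log total) binary search for the smallest n with n(n+1)/2 > total, returning (n(n+1)/2 - total, n) directly.
import Mathlib
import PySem

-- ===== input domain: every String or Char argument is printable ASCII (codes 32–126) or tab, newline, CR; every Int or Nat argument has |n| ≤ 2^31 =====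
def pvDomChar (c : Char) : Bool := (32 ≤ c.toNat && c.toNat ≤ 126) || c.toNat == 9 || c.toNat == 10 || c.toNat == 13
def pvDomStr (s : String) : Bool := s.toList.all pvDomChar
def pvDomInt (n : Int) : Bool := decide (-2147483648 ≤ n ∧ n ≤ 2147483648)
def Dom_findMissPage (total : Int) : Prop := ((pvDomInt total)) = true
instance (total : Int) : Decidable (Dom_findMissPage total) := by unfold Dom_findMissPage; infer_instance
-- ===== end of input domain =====

-- B replaces A's grow-the-page-list scan (re-summing the list and scanning every j each round)
-- by a binary search for the smallest n with n(n+1)/2 > total; return value only, no side effects.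

-- triangular-number expression n*(n+1)//2, shared spelling of the arithmetic both Pythons write inline
def tri (n : Int) : Int := PySem.Int.floordiv (n * (n + 1)) 2

-- ===== PORT A =====
-- the inner 'for j in range(1, len(page)+1)' loop of A
def aInner (total : Int) (page : List Int) (find : Int) : Int :=
  (PySem.List.pyRange 1 ((page.length : Int) + 1) 1).foldl
    (fun f j => if page.sum - j = total then f + j else f) find

-- A's 'while True' loop; fuel only guards totality (the loop returns within total+2 rounds whenever it returns)
def aLoop (total : Int) (page : List Int) (i find : Int) : Nat → List Int
  | 0 => []
  | fuel + 1 =>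
    let page' := page ++ [i]
    let find' := aInner total page' find
    if find' > 0 then [find', (page'.length : Int)]
    else aLoop total page' (i + 1) find' fuel

def findMissPage (total : Int) : List Int :=
  if total ≠ 0 then aLoop total [] 1 0 (total + 2).toNat
  else [0, 0]

-- ===== PORT B =====
-- binary search: smallest n in [lo, hi] with n(n+1)//2 > total
-- (fuel ≥ hi - lo only guards totality; the loop narrows [lo, hi] each round)
def bSearch (total lo hi : Int) : Nat → Int
  | 0 => lo
  | fuel + 1 =>
    if lo < hi then
      let mid := PySem.Int.floordiv (lo + hi) 2
      if tri mid > total then bSearch total lo mid fuel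
      else bSearch total (mid + 1) hi fuel
    else lo

def findMissPage_alt (total : Int) : List Int :=
  if total = 0 then [0, 0]
  else
    let n := bSearch total 1 (total + 1) (total + 1 - 1).toNat
    [tri n - total, n]

-- ===== PRECONDITION & SPEC =====
-- Pre_ excludes negative totals: there A's while-loop never finds a match and diverges (returns nothing).
def Pre_findMissPage (total : Int) : Prop := 0 ≤ total
instance (total : Int) : Decidable (Pre_findMissPage total) := by unfold Pre_findMissPage; infer_instance
def pvWitness_findMissPage : Int := (5)

def Spec_findMissPage (total : Int) (out : List Int) : Prop := out = findMissPage_alt total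
instance (total : Int) (out : List Int) : Decidable (Spec_findMissPage total out) := by unfold Spec_findMissPage; infer_instance

-- ===== CLAIM (what is proved, stated in full; the proofs are below) =====
def Claim_equal_findMissPage : Prop := ∀ (total : Int), Dom_findMissPage total → Pre_findMissPage total → Spec_findMissPage total (findMissPage total)

-- ===== LEMMAS AND PROOFS =====

theorem tri_double (n : Int) : 2 * tri n = n * (n + 1) := by
  have hdvd : (2 : Int) ∣ n * (n + 1) := (Int.even_mul_succ_self n).two_dvd
  have hmod : PySem.Int.mod (n * (n + 1)) 2 = 0 :=
    (PySem.Int.mod_eq_zero_iff_dvd _ _).2 hdvd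
  have := PySem.Int.floordiv_mul_add_mod (n * (n + 1)) 2
  unfold tri; omega

theorem tri_succ (n : Int) : tri (n + 1) = tri n + (n + 1) := by
  have h1 := tri_double n
  have h2 := tri_double (n + 1)
  nlinarith

theorem tri_mono {a b : Int} (ha : 0 ≤ a) (hab : a ≤ b) : tri a ≤ tri b := by
  have h1 := tri_double a
  have h2 := tri_double b
  nlinarith

theorem tri_ge_self {n : Int} (hn : 0 ≤ n) : n ≤ tri n := by
  have := tri_double n
  nlinarith [sq_nonneg (n - 1)]

theorem sum_pyRange_tri (m : Nat) : (PySem.List.pyRange 1 ((m : Int) + 1) 1).sum = tri m := by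
  induction m with
  | zero => decide
  | succ k ih =>
    have hsplit := PySem.List.pyRange_one_succ_right (a := 1) (b := (k : Int) + 1) (by omega)
    have : ((k + 1 : Nat) : Int) + 1 = ((k : Int) + 1) + 1 := by push_cast; ring
    rw [this, hsplit, List.sum_append, ih]
    have : ((k + 1 : Nat) : Int) = (k : Int) + 1 := by push_cast; ring
    rw [this, tri_succ]
    simp

theorem foldl_pick (c : Int) : ∀ (l : List Int) (acc : Int), l.Nodup →
    l.foldl (fun f j => if j = c then f + j else f) acc = if c ∈ l then acc + c else acc := by
  intro l
  induction l with
  | nil => simp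
  | cons a t ih =>
    intro acc hnd
    have hndt := hnd.of_cons
    by_cases hac : a = c
    · subst hac
      have hna : a ∉ t := by
        have := hnd; simp [List.nodup_cons] at this; exact this.1
      simp only [List.foldl_cons, if_pos rfl, List.mem_cons, true_or, if_pos]
      rw [ih _ hndt, if_neg hna]
    · simp only [List.foldl_cons, if_neg hac]
      rw [ih _ hndt]
      simp [List.mem_cons, Ne.symm hac]

-- the inner loop over page = [1..n] from find = 0 yields tri n - total when that is a page number, else 0
theorem aInner_eq (total : Int) (n : Nat) (hn : 1 ≤ n) :
    aInner total (PySem.List.pyRange 1 ((n : Int) + 1) 1) 0 =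
      if 1 ≤ tri n - total ∧ tri n - total ≤ (n : Int) then tri n - total else 0 := by
  unfold aInner
  have hlen : ((PySem.List.pyRange 1 ((n : Int) + 1) 1).length : Int) = (n : Int) := by
    rw [PySem.List.length_pyRange_one]; omega
  have hsum : (PySem.List.pyRange 1 ((n : Int) + 1) 1).sum = tri n := sum_pyRange_tri n
  rw [hlen, hsum]
  have hfun : (fun (f j : Int) => if tri n - j = total then f + j else f) =
      (fun (f j : Int) => if j = tri n - total then f + j else f) := by
    funext f j
    by_cases hj : j = tri n - total
    · rw [if_pos hj, if_pos (by omega)]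
    · rw [if_neg hj, if_neg (by omega)]
  rw [hfun, foldl_pick _ _ _ (PySem.List.nodup_pyRange_one _ _)]
  simp only [PySem.List.mem_pyRange_one]
  by_cases hc : 1 ≤ tri ↑n - total ∧ tri ↑n - total ≤ (n : Int)
  · rw [if_pos (by omega), if_pos hc]; ring
  · rw [if_neg (by omega), if_neg hc]

theorem aLoop_eq (total r : Int) (htot : 1 ≤ total) (hr1 : 1 ≤ r)
    (hPr : total < tri r) (hPr' : ¬ total < tri (r - 1)) :
    ∀ (fuel k : Nat), (k : Int) < r → r ≤ (k : Int) + (fuel : Int) → ¬ total < tri k →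
      aLoop total (PySem.List.pyRange 1 ((k : Int) + 1) 1) ((k : Int) + 1) 0 fuel =
        [tri r - total, r] := by
  intro fuel
  induction fuel with
  | zero => intro k h1 h2 _; exfalso; push_cast at h2; omega
  | succ m ih =>
    intro k hk hkr hTk
    unfold aLoop
    have hsplit := PySem.List.pyRange_one_succ_right (a := 1) (b := (k : Int) + 1) (by omega)
    have hpage : PySem.List.pyRange 1 ((k : Int) + 1) 1 ++ [(k : Int) + 1] =
        PySem.List.pyRange 1 (((k + 1 : Nat) : Int) + 1) 1 := by
      push_cast; rw [hsplit]
    simp only [hpage]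
    have hinner := aInner_eq total (k + 1) (by omega)
    rw [hinner]
    have hklift : ((k + 1 : Nat) : Int) = (k : Int) + 1 := by push_cast; ring
    have htrik : tri ((k + 1 : Nat) : Int) - ((k : Int) + 1) = tri k := by
      rw [hklift, tri_succ]; ring
    by_cases hcase : (k : Int) + 1 = r
    · -- this round finds the page
      have hcond : 1 ≤ tri ((k + 1 : Nat) : Int) - total ∧
          tri ((k + 1 : Nat) : Int) - total ≤ ((k + 1 : Nat) : Int) := by
        constructor
        · rw [hklift, hcase]; omega
        · have : tri ((k + 1 : Nat) : Int) = tri k + ((k : Int) + 1) := by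
            rw [hklift, tri_succ]
          have hk' : tri k ≤ total := by
            have : tri (r - 1) = tri k := by rw [← hcase]; norm_num
            omega
          omega
      rw [if_pos hcond, if_pos (by rw [hklift, hcase]; omega)]
      have hlen : ((PySem.List.pyRange 1 (((k + 1 : Nat) : Int) + 1) 1).length : Int) =
          ((k + 1 : Nat) : Int) := by
        rw [PySem.List.length_pyRange_one]; push_cast; omega
      rw [hlen, hklift, hcase]
    · -- no match yet: tri (k+1) ≤ total, recurse
      have hlt : (k : Int) + 1 < r := by omega
      have hTk1 : tri ((k : Int) + 1) ≤ total := by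
        have : tri ((k : Int) + 1) ≤ tri (r - 1) := tri_mono (by omega) (by omega)
        omega
      have hcond : ¬ (1 ≤ tri ((k + 1 : Nat) : Int) - total ∧
          tri ((k + 1 : Nat) : Int) - total ≤ ((k + 1 : Nat) : Int)) := by
        rw [hklift]; omega
      rw [if_neg hcond, if_neg (by norm_num)]
      have := ih (k + 1) (by push_cast; omega) (by push_cast at hkr ⊢; omega)
        (by rw [hklift]; omega)
      rw [hklift] at this
      exact this

theorem bSearch_inv (total : Int) : ∀ (fuel : Nat) (lo hi : Int), (hi - lo).toNat ≤ fuel →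
    1 ≤ lo → lo ≤ hi → ¬ total < tri (lo - 1) → total < tri hi →
    1 ≤ bSearch total lo hi fuel ∧ total < tri (bSearch total lo hi fuel) ∧
      ¬ total < tri (bSearch total lo hi fuel - 1) := by
  intro fuel
  induction fuel with
  | zero =>
    intro lo hi hm h1 hle hlow hhigh
    have heq : lo = hi := by omega
    subst heq
    exact ⟨h1, hhigh, hlow⟩
  | succ m ih =>
    intro lo hi hm h1 hle hlow hhigh
    by_cases h : lo < hi
    · have hb1 := (PySem.Int.le_floordiv_iff_mul_le (a := lo + hi) (b := 2) (q := lo) (by norm_num)).2 (by omega)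
      have hb2 := (PySem.Int.floordiv_lt_iff_lt_mul (a := lo + hi) (b := 2) (q := hi) (by norm_num)).2 (by omega)
      unfold bSearch
      rw [if_pos h]
      by_cases hc : tri (PySem.Int.floordiv (lo + hi) 2) > total
      · rw [if_pos hc]
        exact ih lo _ (by omega) h1 (by omega) hlow hc
      · rw [if_neg hc]
        refine ih _ hi (by omega) (by omega) (by omega) ?_ hhigh
        have : PySem.Int.floordiv (lo + hi) 2 + 1 - 1 = PySem.Int.floordiv (lo + hi) 2 := by ring
        rw [this]
        exact hc
    · have heq : lo = hi := by omega
      unfold bSearch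
      rw [if_neg h]
      subst heq
      exact ⟨h1, hhigh, hlow⟩

-- ===== VERDICT (by name: the statement is the Claim_ definition above) =====
theorem findMissPage_spec : Claim_equal_findMissPage := by
  intro total _ hpre
  unfold Spec_findMissPage
  by_cases h0 : total = 0
  · subst h0; rfl
  · have htot : 1 ≤ total := by unfold Pre_findMissPage at hpre; omega
    have htri0 : tri 0 = 0 := by decide
    have hlow : ¬ total < tri (1 - 1) := by norm_num [htri0]; omega
    have hhigh : total < tri (total + 1) := by
      have := tri_ge_self (n := total + 1) (by omega)
      omega
    obtain ⟨hr1, hPr, hPr'⟩ := bSearch_inv total (total + 1 - 1).toNat 1 (total + 1)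
      (by omega) le_rfl (by omega) hlow hhigh
    set r := bSearch total 1 (total + 1) (total + 1 - 1).toNat with hrdef
    -- r ≤ total + 1
    have hrle : r ≤ total + 1 := by
      have h1 : r - 1 ≤ tri (r - 1) := tri_ge_self (by omega)
      omega
    -- B's value
    have hB : findMissPage_alt total = [tri r - total, r] := by
      unfold findMissPage_alt
      rw [if_neg h0]
    rw [hB]
    -- A's value
    unfold findMissPage
    rw [if_pos h0]
    have hstart := aLoop_eq total r htot hr1 hPr hPr' (total + 2).toNat 0
      (by norm_num; omega) (by push_cast; omega) (by norm_num [htri0]; omega)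
    have hempty : PySem.List.pyRange 1 ((0 : Nat) + 1 : Int) 1 = ([] : List Int) := by decide
    rw [hempty] at hstart
    norm_num at hstart ⊢
    exact hstart
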